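-- pv_equiv track=rewrite | github.com/LHT02/KIGTTS | pc_trainer/app.py | _strip_language_flags
-- ===== SOURCE A (Python) =====
-- def _strip_language_flags(text: str) -> str:
--     out: list[str] = []
--     in_flag = False
--     for ch in text:
--         if in_flag:
--             if ch == ")":
--                 in_flag = False
--             continue
--         if ch == "(":
--             in_flag = True
--             continue
--         if ch in "\r\n":
--             continue
--         out.append(ch)
--     return "".join(out)
-- ===== SOURCE B (Python) =====
-- def _strip_language_flags(text: str) -> str:
--     i = text.find("(")
--     kept = text if i == -1 else text[:i]
--     cleaned = "".join(c for c in kept if c not in "\r\n")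
--     if i == -1:
--         return cleaned
--     j = text.find(")", i + 1)
--     if j == -1:
--         return cleaned
--     return cleaned + _strip_language_flags(text[j + 1:])
-- ===== Notes on version B (the rewrite author's own statement) =====
-- stated objective: alternative
-- what changed: Replaces the per-character boolean in_flag automaton by a recursion that locates each parenthesized flag with str.find and slicing, cleaning and keeping whole segments at a time.
import Mathlib
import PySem

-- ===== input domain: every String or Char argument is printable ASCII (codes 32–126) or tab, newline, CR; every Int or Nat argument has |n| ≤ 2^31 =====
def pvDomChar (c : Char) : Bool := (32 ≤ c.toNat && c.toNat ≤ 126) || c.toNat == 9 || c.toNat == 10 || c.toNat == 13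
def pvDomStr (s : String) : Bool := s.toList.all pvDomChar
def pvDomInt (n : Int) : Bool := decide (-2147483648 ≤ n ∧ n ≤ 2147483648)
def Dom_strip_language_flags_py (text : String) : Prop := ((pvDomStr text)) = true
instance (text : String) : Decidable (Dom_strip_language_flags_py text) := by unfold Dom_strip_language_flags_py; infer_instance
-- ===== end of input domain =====

-- B replaces A's per-character in_flag automaton by a recursion that locates each
-- parenthesized flag with str.find and slicing, cleaning whole segments at a time (objective: alternative).

-- ===== PORT A =====
-- one iteration of A's for-loop; state = (out, in_flag); 'ch in "\r\n"' is the exact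
-- two-character membership test
def stepA (st : List Char × Bool) (ch : Char) : List Char × Bool :=
  if st.2 then (if ch = ')' then (st.1, false) else st)
  else if ch = '(' then (st.1, true)
  else if ch = '\r' ∨ ch = '\n' then st
  else (st.1 ++ [ch], st.2)

-- "".join(out) over a list of single characters is String.mk
def strip_language_flags_py (text : String) : String :=
  String.mk (text.toList.foldl stepA ([], false)).1

-- ===== PORT B =====
-- termination fact for B's recursion: text[j+1:] is strictly shorter (cited by decreasing_by)
theorem pvSliceLt (cs : List Char)
    (hi : PySem.Chars.find cs ['('] ≠ -1)
    (hj : PySem.Chars.findFrom cs [')'] (PySem.Chars.find cs ['('] + 1) ≠ -1) :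
    (PySem.List.slice cs (some (PySem.Chars.findFrom cs [')'] (PySem.Chars.find cs ['('] + 1) + 1))).length
      < cs.length := by
  have hge := PySem.Chars.neg_one_le_find cs ['(']
  have hi0 : 0 ≤ PySem.Chars.find cs ['('] := by omega
  obtain ⟨hpre, -⟩ := PySem.Chars.find_spec hi0
  have hlt : (PySem.Chars.find cs ['(']).toNat < cs.length := by
    by_contra h
    rw [List.drop_eq_nil_of_le (by omega)] at hpre
    simp at hpre
  have hk : (PySem.Chars.find cs ['(']).toNat + 1 ≤ cs.length := by omega
  have hcast : ((((PySem.Chars.find cs ['(']).toNat + 1 : ℕ)) : ℤ)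
      = PySem.Chars.find cs ['('] + 1 := by omega
  rw [← hcast] at hj ⊢
  obtain ⟨hle, hpre2, -⟩ := PySem.Chars.findFrom_natCast_spec cs [')'] _ hk hj
  have hjlt : (PySem.Chars.findFrom cs [')'] (((PySem.Chars.find cs ['(']).toNat + 1 : ℕ) : ℤ)).toNat
      < cs.length := by
    by_contra h
    rw [List.drop_eq_nil_of_le (by omega)] at hpre2
    simp at hpre2
  rw [PySem.List.slice_from cs (by omega)]
  simp only [List.length_drop]
  omega

-- recursion over the characters of the string (PySem.Chars.find / slice are exactly
-- str.find / slicing on the underlying character list); 'c not in "\r\n"' is the exact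
-- two-character membership test
def stripAltChars (cs : List Char) : List Char :=
  let i := PySem.Chars.find cs ['(']                                   -- text.find("(")
  let kept := if i = -1 then cs else PySem.List.slice cs none (some i) -- text[:i]
  let cleaned := kept.filter (fun c => !(c == '\r' || c == '\n'))      -- "".join(c for c in kept if c not in "\r\n")
  if hi : i = -1 then cleaned
  else
    let j := PySem.Chars.findFrom cs [')'] (i + 1)                     -- text.find(")", i + 1)
    if hj : j = -1 then cleaned
    else cleaned ++ stripAltChars (PySem.List.slice cs (some (j + 1))) -- text[j+1:]
termination_by cs.length
decreasing_by exact pvSliceLt cs hi hj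

def strip_language_flags_py_alt (text : String) : String :=
  String.mk (stripAltChars text.toList)

-- ===== PRECONDITION & SPEC =====
def Spec_strip_language_flags_py (text : String) (out : String) : Prop := out = strip_language_flags_py_alt text
instance (text : String) (out : String) : Decidable (Spec_strip_language_flags_py text out) := by unfold Spec_strip_language_flags_py; infer_instance

-- ===== CLAIM (what is proved, stated in full; the proofs are below) =====
def Claim_equal_strip_language_flags_py : Prop := ∀ (text : String), Dom_strip_language_flags_py text → Spec_strip_language_flags_py text (strip_language_flags_py text)

-- ===== LEMMAS AND PROOFS =====

-- find.go at start offset x is find.go at 0, shifted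
theorem pvGoShift (cs : List Char) (sub : List Char) (hsub : sub ≠ []) (x : ℕ) :
    PySem.Chars.find.go sub cs x
      = if PySem.Chars.find.go sub cs 0 = -1 then -1 else x + PySem.Chars.find.go sub cs 0 := by
  induction cs generalizing x with
  | nil => simp [PySem.Chars.find.go.eq_1, List.isEmpty_iff, hsub]
  | cons c t ih =>
    rw [PySem.Chars.find.go.eq_2, PySem.Chars.find.go.eq_2]
    by_cases hp : sub.isPrefixOf (c :: t) = true
    · rw [if_pos hp, if_pos hp]
      norm_num
    · rw [if_neg hp, if_neg hp, ih (x + 1), ih 1]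
      have hne : -1 ≤ PySem.Chars.find.go sub t 0 := PySem.Chars.neg_one_le_find t sub
      by_cases h0 : PySem.Chars.find.go sub t 0 = -1
      · simp [h0]
      · simp only [if_neg h0]
        rw [if_neg (show ¬ ((1 : ℕ) : ℤ) + PySem.Chars.find.go sub t 0 = -1 by push_cast; omega)]
        push_cast
        ring

-- find for a single-character needle on a cons
theorem pvFindCons (c p : Char) (cs : List Char) :
    PySem.Chars.find (c :: cs) [p]
      = if c = p then 0
        else if PySem.Chars.find cs [p] = -1 then -1 else PySem.Chars.find cs [p] + 1 := by
  show PySem.Chars.find.go [p] (c :: cs) 0 = _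
  rw [PySem.Chars.find.go.eq_2]
  have hpre : ([p].isPrefixOf (c :: cs)) = (p == c) := by simp [List.isPrefixOf]
  rw [hpre]
  by_cases h : c = p
  · simp [h]
  · have : (p == c) = false := by simp [Ne.symm h]
    rw [this]
    simp only [Bool.false_eq_true, if_false, h]
    rw [pvGoShift cs [p] (by simp) 1]
    by_cases h0 : PySem.Chars.find.go [p] cs 0 = -1
    · simp [PySem.Chars.find, h0]
    · simp only [PySem.Chars.find, h0, if_false]
      push_cast
      ring

theorem pvStripAltNil : stripAltChars [] = [] := by
  rw [stripAltChars]
  simp [PySem.Chars.find, PySem.Chars.find.go.eq_1]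

-- a non-(-1) find result is an index inside cs
theorem pvFindLtLength (cs : List Char) (p : Char) (h : PySem.Chars.find cs [p] ≠ -1) :
    (PySem.Chars.find cs [p]).toNat < cs.length := by
  have hge := PySem.Chars.neg_one_le_find cs [p]
  obtain ⟨hpre, -⟩ := PySem.Chars.find_spec (s := cs) (sub := [p]) (by omega)
  by_contra hc
  rw [List.drop_eq_nil_of_le (by omega)] at hpre
  simp at hpre

-- B on an opening-parenthesis head: skip through the first closing parenthesis of the tail
-- (or everything if there is none)
theorem pvStripAltParen (cs : List Char) :
    stripAltChars ('(' :: cs)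
      = if PySem.Chars.find cs [')'] = -1 then []
        else stripAltChars (List.drop ((PySem.Chars.find cs [')']).toNat + 1) cs) := by
  rw [stripAltChars]
  have hi : PySem.Chars.find ('(' :: cs) ['('] = 0 := by rw [pvFindCons]; simp
  simp only [hi]
  have h01 : ((0 : ℤ)) = -1 ↔ False := by norm_num
  rw [dif_neg (by norm_num)]
  have hk : (1 : ℕ) ≤ ('(' :: cs).length := by simp
  have hcast : ((0 : ℤ) + 1) = ((1 : ℕ) : ℤ) := by norm_num
  rw [hcast, PySem.Chars.findFrom_natCast ('(' :: cs) [')'] 1 hk, Nat.cast_one]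
  simp only [List.drop_one, List.tail_cons]
  have hkept : (if (0 : ℤ) = -1 then '(' :: cs else PySem.List.slice ('(' :: cs) none (some 0)) = [] := by
    rw [if_neg (by norm_num), PySem.List.slice_to ('(' :: cs) (le_refl 0)]
    simp
  rw [hkept]
  simp only [List.filter_nil, List.nil_append]
  by_cases hf : PySem.Chars.find cs [')'] = -1
  · simp [hf]
  · have hge := PySem.Chars.neg_one_le_find cs [')']
    have hne : ¬ ((1 : ℤ) + PySem.Chars.find cs [')'] = -1) := by omega
    simp only [hf, if_false, hne, dif_neg]
    rw [PySem.List.slice_from ('(' :: cs) (a := 1 + PySem.Chars.find cs [')'] + 1) (by omega)]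
    have : ((1 : ℤ) + PySem.Chars.find cs [')'] + 1).toNat
        = (PySem.Chars.find cs [')']).toNat + 2 := by omega
    rw [this]
    simp [List.drop_succ_cons]

-- B on any other head: the head is kept (unless it is a newline), then B continues on the tail
theorem pvStripAltCons (c : Char) (cs : List Char) (hc : c ≠ '(') :
    stripAltChars (c :: cs)
      = (if c = '\r' ∨ c = '\n' then [] else [c]) ++ stripAltChars cs := by
  conv_lhs => rw [stripAltChars]
  rw [pvFindCons c '(' cs]
  simp only [hc, if_false]
  by_cases hi : PySem.Chars.find cs ['('] = -1
  · -- no '(' anywhere: both sides are plain newline filters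
    simp only [hi, if_true, dif_pos]
    conv_rhs => rw [stripAltChars]
    simp only [hi, if_true, dif_pos]
    simp only [List.filter_cons]
    by_cases hnl : c = '\r' ∨ c = '\n'
    · rcases hnl with h | h <;> simp [h]
    · have h1 : c ≠ '\r' := fun h => hnl (Or.inl h)
      have h2 : c ≠ '\n' := fun h => hnl (Or.inr h)
      simp [h1, h2, hnl]
  · have hge := PySem.Chars.neg_one_le_find cs ['(']
    have hi0 : (0 : ℤ) ≤ PySem.Chars.find cs ['('] := by omega
    have hne1 : ¬ (PySem.Chars.find cs ['('] + 1 = -1) := by omega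
    simp only [hi, if_false, hne1, dif_neg]
    have hilt := pvFindLtLength cs '(' hi
    -- kept on the left is c :: kept on the right
    rw [PySem.List.slice_to (c :: cs) (b := PySem.Chars.find cs ['('] + 1) (by omega)]
    have htn : (PySem.Chars.find cs ['('] + 1).toNat = (PySem.Chars.find cs ['(']).toNat + 1 := by omega
    rw [htn, List.take_succ_cons]
    -- the two findFrom calls see the same suffix
    have hk1 : (PySem.Chars.find cs ['(']).toNat + 1 + 1 ≤ (c :: cs).length := by
      simp; omega
    have hk2 : (PySem.Chars.find cs ['(']).toNat + 1 ≤ cs.length := by omega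
    have hcast1 : PySem.Chars.find cs ['('] + 1 + 1 = (((PySem.Chars.find cs ['(']).toNat + 1 + 1 : ℕ) : ℤ) := by omega
    have hcast2 : PySem.Chars.find cs ['('] + 1 = (((PySem.Chars.find cs ['(']).toNat + 1 : ℕ) : ℤ) := by omega
    rw [hcast1, PySem.Chars.findFrom_natCast (c :: cs) [')'] _ hk1]
    conv_rhs => rw [stripAltChars]
    simp only [hi, if_false, hne1, dif_neg]
    rw [hcast2, PySem.Chars.findFrom_natCast cs [')'] _ hk2]
    rw [PySem.List.slice_to cs (b := PySem.Chars.find cs ['(']) hi0]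
    have hdrop : List.drop ((PySem.Chars.find cs ['(']).toNat + 1 + 1) (c :: cs)
        = List.drop ((PySem.Chars.find cs ['(']).toNat + 1) cs := by
      simp [List.drop_succ_cons]
    rw [hdrop]
    set f := PySem.Chars.find (List.drop ((PySem.Chars.find cs ['(']).toNat + 1) cs) [')'] with hfdef
    have hgef : -1 ≤ f := PySem.Chars.neg_one_le_find _ _
    by_cases hfne : f = -1
    · -- no closing ')': both return their cleaned segment
      simp only [hfne, if_true, dif_pos]
      simp only [List.filter_cons]
      by_cases hnl : c = '\r' ∨ c = '\n'
      · rcases hnl with h | h <;> simp [h]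
      · have h1 : c ≠ '\r' := fun h => hnl (Or.inl h)
        have h2 : c ≠ '\n' := fun h => hnl (Or.inr h)
        simp [h1, h2, hnl]
    · have hne2 : ¬ ((((PySem.Chars.find cs ['(']).toNat + 1 + 1 : ℕ) : ℤ) + f = -1) := by omega
      have hne3 : ¬ ((((PySem.Chars.find cs ['(']).toNat + 1 : ℕ) : ℤ) + f = -1) := by omega
      simp only [hfne, if_false, hne2, hne3, dif_neg]
      -- the recursive arguments coincide
      have hr1 : ((((PySem.Chars.find cs ['(']).toNat + 1 + 1 : ℕ) : ℤ) + f + 1) = ((((PySem.Chars.find cs ['(']).toNat + 1 + 1 + f.toNat + 1 : ℕ)) : ℤ) := by omega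
      have hr2 : ((((PySem.Chars.find cs ['(']).toNat + 1 : ℕ) : ℤ) + f + 1) = ((((PySem.Chars.find cs ['(']).toNat + 1 + f.toNat + 1 : ℕ)) : ℤ) := by omega
      rw [hr1, hr2,
        PySem.List.slice_from (c :: cs) (a := (((PySem.Chars.find cs ['(']).toNat + 1 + 1 + f.toNat + 1 : ℕ) : ℤ)) (by positivity),
        PySem.List.slice_from cs (a := (((PySem.Chars.find cs ['(']).toNat + 1 + f.toNat + 1 : ℕ) : ℤ)) (by positivity)]
      simp only [Int.toNat_natCast]
      have hdrop2 : List.drop ((PySem.Chars.find cs ['(']).toNat + 1 + 1 + f.toNat + 1) (c :: cs)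
          = List.drop ((PySem.Chars.find cs ['(']).toNat + 1 + f.toNat + 1) cs := by
        have : (PySem.Chars.find cs ['(']).toNat + 1 + 1 + f.toNat + 1
            = ((PySem.Chars.find cs ['(']).toNat + 1 + f.toNat + 1) + 1 := by omega
        rw [this, List.drop_succ_cons]
      rw [hdrop2]
      simp only [List.filter_cons]
      by_cases hnl : c = '\r' ∨ c = '\n'
      · rcases hnl with h | h <;> simp [h]
      · have h1 : c ≠ '\r' := fun h => hnl (Or.inl h)
        have h2 : c ≠ '\n' := fun h => hnl (Or.inr h)
        simp [h1, h2, hnl]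

-- the loop invariant: from flag-off state the fold appends B's answer, from flag-on state
-- it appends B's answer for the text after the next closing parenthesis
theorem pvMain : ∀ n : ℕ, ∀ cs : List Char, cs.length ≤ n →
    (∀ acc : List Char, (cs.foldl stepA (acc, false)).1 = acc ++ stripAltChars cs) ∧
    (∀ acc : List Char, (cs.foldl stepA (acc, true)).1
        = acc ++ (if PySem.Chars.find cs [')'] = -1 then []
                  else stripAltChars (List.drop ((PySem.Chars.find cs [')']).toNat + 1) cs))) := by
  intro n
  induction n with
  | zero =>
    intro cs hlen
    have : cs = [] := List.eq_nil_of_length_eq_zero (by omega)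
    subst this
    constructor <;> intro acc <;>
      simp [pvStripAltNil, PySem.Chars.find, PySem.Chars.find.go.eq_1]
  | succ n ih =>
    intro cs hlen
    cases cs with
    | nil =>
      constructor <;> intro acc <;>
        simp [pvStripAltNil, PySem.Chars.find, PySem.Chars.find.go.eq_1]
    | cons c cs' =>
      have hlen' : cs'.length ≤ n := by simp at hlen; omega
      constructor
      · intro acc
        by_cases hc : c = '('
        · subst hc
          rw [List.foldl_cons]
          have hstep : stepA (acc, false) '(' = (acc, true) := by simp [stepA]
          rw [hstep, (ih cs' hlen').2 acc, pvStripAltParen cs']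
        · rw [List.foldl_cons]
          by_cases hnl : c = '\r' ∨ c = '\n'
          · have hstep : stepA (acc, false) c = (acc, false) := by
              simp only [stepA]
              simp [hc, hnl]
            rw [hstep, (ih cs' hlen').1 acc, pvStripAltCons c cs' hc]
            simp [hnl]
          · have hstep : stepA (acc, false) c = (acc ++ [c], false) := by
              simp only [stepA]
              simp [hc, hnl]
            rw [hstep, (ih cs' hlen').1 (acc ++ [c]), pvStripAltCons c cs' hc]
            simp [hnl]
      · intro acc
        rw [List.foldl_cons]
        by_cases hc : c = ')'
        · subst hc
          have hstep : stepA (acc, true) ')' = (acc, false) := by simp [stepA]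
          rw [hstep, (ih cs' hlen').1 acc]
          have hf : PySem.Chars.find (')' :: cs') [')'] = 0 := by rw [pvFindCons]; simp
          simp [hf]
        · have hstep : stepA (acc, true) c = (acc, true) := by simp [stepA, hc]
          rw [hstep, (ih cs' hlen').2 acc]
          rw [pvFindCons c ')' cs']
          simp only [hc, if_false]
          by_cases hf : PySem.Chars.find cs' [')'] = -1
          · simp [hf]
          · have hge := PySem.Chars.neg_one_le_find cs' [')']
            have hne : ¬ (PySem.Chars.find cs' [')'] + 1 = -1) := by omega
            simp only [hf, if_false, hne]
            have : (PySem.Chars.find cs' [')'] + 1).toNat + 1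
                = ((PySem.Chars.find cs' [')']).toNat + 1) + 1 := by omega
            rw [this, List.drop_succ_cons]

-- ===== VERDICT (by name: the statement is the Claim_ definition above) =====
theorem strip_language_flags_py_spec : Claim_equal_strip_language_flags_py := by
  intro text _
  show strip_language_flags_py text = strip_language_flags_py_alt text
  unfold strip_language_flags_py strip_language_flags_py_alt
  rw [(pvMain text.toList.length text.toList le_rfl).1 []]
  simp
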